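-- pv_equiv track=rewrite | github.com/ritishadhikari/leetCode | 1769_Minimum_Number_of_Operations_to_Move_All_Balls_to_Each_Box.py | minOperations
-- ===== SOURCE A (Python) =====
-- from typing import List
--
-- def minOperations(boxes: str) -> List[int]:
--     ones=[]
--     for index,box in enumerate(boxes):
--         if box=="1":
--             ones.append(index)
--
--     output=[]
--     for index,box in enumerate(boxes):
--         count=0
--         for refIndex in ones:
--             if index!=refIndex:
--                 count+=abs(index-refIndex)
--         output.append(count)
--     return output
-- ===== SOURCE B (Python) =====
-- def minOperations(boxes):
--     n = len(boxes)
--     pos = []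
--     i = boxes.find("1")
--     while i != -1:
--         pos.append(i)
--         i = boxes.find("1", i + 1)
--     m = len(pos)
--     out = []
--     cur = sum(pos)          # total cost at box 0
--     prev = 0
--     for left, p in enumerate(pos):
--         step = 2 * left - m
--         seg = p - prev
--         out.extend(range(cur, cur + step * seg, step) if step else [cur] * seg)
--         cur += step * seg
--         prev = p
--     seg = n - prev
--     out.extend(range(cur, cur + m * seg, m) if m else [0] * seg)
--     return out
-- ===== Notes on version B (the rewrite author's own statement) =====
-- stated objective: faster
-- what changed: Instead of re-scanning all ball indices for every box, B collects the ball positions once and emits the answer segment-by-segment between consecutive balls as arithmetic progressions (the cost changes by a constant step inside each segment).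
import Mathlib
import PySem

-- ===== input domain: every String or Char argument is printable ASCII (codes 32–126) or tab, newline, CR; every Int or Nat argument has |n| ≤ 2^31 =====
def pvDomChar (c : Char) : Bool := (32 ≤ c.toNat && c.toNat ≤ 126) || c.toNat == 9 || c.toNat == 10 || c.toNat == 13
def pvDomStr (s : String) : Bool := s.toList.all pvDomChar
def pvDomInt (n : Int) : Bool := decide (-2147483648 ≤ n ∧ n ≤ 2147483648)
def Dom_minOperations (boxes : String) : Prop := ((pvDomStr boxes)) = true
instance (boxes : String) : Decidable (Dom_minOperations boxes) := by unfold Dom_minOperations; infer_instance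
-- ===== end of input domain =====

-- B collects ball positions once and emits the answer as per-segment arithmetic progressions instead of A's per-box scan over all ball indices; measured faster in a timing run.


-- ===== PORT A =====
def minOperations (boxes : String) : List Int :=
  let ones : List Int :=
    (PySem.List.enumerate boxes.toList).foldl
      (fun acc p => if p.2 = '1' then acc ++ [p.1] else acc) []
  (PySem.List.enumerate boxes.toList).foldl
    (fun output p =>
      output ++ [ones.foldl (fun count j =>
        if p.1 ≠ j then count + |p.1 - j| else count) 0]) []

-- ===== PORT B =====
-- the 'while i != -1: pos.append(i); i = boxes.find("1", i+1)' scan; the fuel argument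
-- (one more than the string length) is only a totality guard, the loop stops on -1
def scanLoop (boxes : String) : Nat -> Int -> List Int -> List Int
  | 0, _, acc => acc
  | fuel + 1, i, acc =>
    if i = -1 then acc
    else scanLoop boxes fuel (PySem.Str.findFrom boxes "1" (i + 1)) (acc ++ [i])

-- the main loop carries (out, cur, prev) and extends out with range(cur, cur+step*seg, step)
-- (or [cur]*seg when step == 0); the tail after the last ball is emitted the same way.
def minOperations_alt (boxes : String) : List Int :=
  let n : Int := (boxes.toList.length : Int)
  let pos : List Int := scanLoop boxes (boxes.toList.length + 1) (PySem.Str.find boxes "1") []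
  let m : Int := (pos.length : Int)
  let st :=
    (PySem.List.enumerate pos).foldl
      (fun (st : List Int × Int × Int) q =>
        (st.1 ++ (if 2 * q.1 - m ≠ 0
                  then PySem.List.pyRange st.2.1 (st.2.1 + (2 * q.1 - m) * (q.2 - st.2.2)) (2 * q.1 - m)
                  else List.replicate (q.2 - st.2.2).toNat st.2.1),
         st.2.1 + (2 * q.1 - m) * (q.2 - st.2.2), q.2))
      ([], pos.sum, 0)
  st.1 ++ (if m ≠ 0 then PySem.List.pyRange st.2.1 (st.2.1 + m * (n - st.2.2)) m
           else List.replicate (n - st.2.2).toNat 0)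

-- ===== PRECONDITION & SPEC =====
def Spec_minOperations (boxes : String) (out : List Int) : Prop := out = minOperations_alt boxes
instance (boxes : String) (out : List Int) : Decidable (Spec_minOperations boxes out) := by unfold Spec_minOperations; infer_instance

-- ===== CLAIM (what is proved, stated in full; the proofs are below) =====
def Claim_equal_minOperations : Prop := ∀ (boxes : String), Dom_minOperations boxes → Spec_minOperations boxes (minOperations boxes)

-- ===== LEMMAS AND PROOFS =====

-- the ball-position list both ports compute, and the total move cost to box i
def onesL (cs : List Char) : List Int :=
  ((PySem.List.enumerate cs).filter fun q => decide (q.2 = '1')).map (fun q => q.1)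

def fsum (pos : List Int) (i : Int) : Int := (pos.map (fun x => |i - x|)).sum

theorem sum_map_le (l : List Int) (i : Int) (h : ∀ x ∈ l, x ≤ i) :
    (l.map (fun x => |i - x|)).sum = l.length * i - l.sum := by
  induction l with
  | nil => simp
  | cons x l ih =>
    simp only [List.map_cons, List.sum_cons, List.length_cons]
    rw [ih (fun y hy => h y (List.mem_cons_of_mem _ hy)),
      abs_of_nonneg (by have := h x List.mem_cons_self; omega)]
    push_cast; ring

theorem sum_map_ge (l : List Int) (i : Int) (h : ∀ x ∈ l, i ≤ x) :
    (l.map (fun x => |i - x|)).sum = l.sum - l.length * i := by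
  induction l with
  | nil => simp
  | cons x l ih =>
    simp only [List.map_cons, List.sum_cons, List.length_cons]
    rw [ih (fun y hy => h y (List.mem_cons_of_mem _ hy)),
      abs_of_nonpos (by have := h x List.mem_cons_self; omega)]
    push_cast; ring

theorem fsum_eval (pre suf : List Int) (i : Int)
    (hpre : ∀ x ∈ pre, x ≤ i) (hsuf : ∀ x ∈ suf, i ≤ x) :
    fsum (pre ++ suf) i
      = (2 * (pre.length : Int) - ((pre ++ suf).length : Int)) * i + (suf.sum - pre.sum) := by
  unfold fsum
  rw [List.map_append, List.sum_append, sum_map_le pre i hpre, sum_map_ge suf i hsuf]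
  simp only [List.length_append]
  push_cast; ring

theorem pyRange_arith (c a : Int) (ha : a ≠ 0) (s : Nat) :
    PySem.List.pyRange c (c + a * s) a = (List.range s).map (fun k : Nat => c + a * (k : Int)) := by
  rcases ha.lt_or_gt with hneg | hpos
  · simp only [PySem.List.pyRange, if_neg ha, if_neg (not_lt.mpr hneg.le)]
    by_cases hs : s = 0
    · subst hs; simp
    · have hs0 : (0 : Int) < s := by exact_mod_cast Nat.pos_of_ne_zero hs
      have hlt : c + a * (s : Int) < c := by nlinarith
      rw [if_pos hlt]
      have hdiv : (c - (c + a * s) + -a - 1) / -a = (s : Int) := by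
        have h1 : c - (c + a * s) + -a - 1 = (-a - 1) + (-a) * s := by ring
        rw [h1, Int.add_mul_ediv_left _ _ (by omega : (-a : Int) ≠ 0),
          Int.ediv_eq_zero_of_lt (by omega) (by omega)]
        ring
      rw [hdiv, Int.toNat_natCast]
  · rw [PySem.List.pyRange_of_pos _ _ hpos]
    by_cases hs : s = 0
    · subst hs; simp
    · have hs0 : (0 : Int) < s := by exact_mod_cast Nat.pos_of_ne_zero hs
      have hlt : c < c + a * (s : Int) := by nlinarith
      rw [if_pos hlt]
      have hdiv : (c + a * s - c + a - 1) / a = (s : Int) := by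
        have h1 : c + a * s - c + a - 1 = (a - 1) + a * s := by ring
        rw [h1, Int.add_mul_ediv_left _ _ (by omega : a ≠ 0),
          Int.ediv_eq_zero_of_lt (by omega) (by omega)]
        ring
      rw [hdiv, Int.toNat_natCast]

theorem fsum_endpoint (pos pre suf : List Int) (hsplit : pos = pre ++ suf) (prev p : Int)
    (hpre : ∀ x ∈ pre, x ≤ prev) (hsuf : ∀ x ∈ suf, p ≤ x) (hprevp : prev ≤ p) :
    fsum pos prev + (2 * (pre.length : Int) - (pos.length : Int)) * (p - prev) = fsum pos p := by
  subst hsplit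
  rw [fsum_eval pre suf prev hpre (fun x hx => le_trans hprevp (hsuf x hx)),
    fsum_eval pre suf p (fun x hx => le_trans (hpre x hx) hprevp) hsuf]
  ring

theorem seg_map_range (pos pre suf : List Int) (hsplit : pos = pre ++ suf) (prev p a : Int)
    (ha : a = 2 * (pre.length : Int) - (pos.length : Int)) (hane : a ≠ 0)
    (hpre : ∀ x ∈ pre, x ≤ prev) (hsuf : ∀ x ∈ suf, p ≤ x) (hprevp : prev ≤ p) :
    PySem.List.pyRange (fsum pos prev) (fsum pos prev + a * (p - prev)) a
      = (PySem.List.pyRange prev p 1).map (fsum pos) := by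
  have hseg : a * (p - prev) = a * ((p - prev).toNat : Int) := by
    rw [Int.toNat_of_nonneg (by omega)]
  rw [hseg, pyRange_arith _ _ hane, PySem.List.pyRange_one, List.map_map]
  apply List.map_congr_left
  intro k hk
  have hk' : (k : Int) < p - prev := by
    have := List.mem_range.mp hk
    omega
  subst hsplit
  have h1 := fsum_eval pre suf prev hpre (fun x hx => le_trans hprevp (hsuf x hx))
  have h2 := fsum_eval pre suf (prev + k)
    (fun x hx => by have := hpre x hx; omega)
    (fun x hx => by have := hsuf x hx; omega)
  simp only [Function.comp]
  rw [h1, h2, ha]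
  ring

theorem seg_map_const (pos pre suf : List Int) (hsplit : pos = pre ++ suf) (prev p a : Int)
    (ha : a = 2 * (pre.length : Int) - (pos.length : Int)) (ha0 : a = 0)
    (hpre : ∀ x ∈ pre, x ≤ prev) (hsuf : ∀ x ∈ suf, p ≤ x) (hprevp : prev ≤ p) :
    List.replicate (p - prev).toNat (fsum pos prev)
      = (PySem.List.pyRange prev p 1).map (fsum pos) := by
  symm
  rw [PySem.List.pyRange_one, List.map_map]
  rw [List.eq_replicate_iff]
  constructor
  · simp
  · intro b hb
    obtain ⟨k, hk, rfl⟩ := List.mem_map.mp hb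
    have hk' : (k : Int) < p - prev := by
      have := List.mem_range.mp hk
      omega
    subst hsplit
    have h1 := fsum_eval pre suf prev hpre (fun x hx => le_trans hprevp (hsuf x hx))
    have h2 := fsum_eval pre suf (prev + k)
      (fun x hx => by have := hpre x hx; omega)
      (fun x hx => by have := hsuf x hx; omega)
    simp only [Function.comp]
    rw [h1, h2]
    have : 2 * (pre.length : Int) - ((pre ++ suf).length : Int) = 0 := by rw [← ha, ha0]
    rw [this]
    ring

theorem segLoop (pos : List Int) (hsorted : List.Pairwise (· < ·) pos) :
    ∀ (suf pre : List Int) (prev : Int),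
    pos = pre ++ suf →
    (∀ x ∈ pre, x ≤ prev) → (∀ x ∈ suf, prev ≤ x) → 0 ≤ prev →
    (PySem.List.enumerate suf ((pre.length : Int))).foldl
      (fun (st : List Int × Int × Int) q =>
        (st.1 ++ (if 2 * q.1 - ((pos.length : Int)) ≠ 0
                  then PySem.List.pyRange st.2.1 (st.2.1 + (2 * q.1 - (pos.length : Int)) * (q.2 - st.2.2)) (2 * q.1 - (pos.length : Int))
                  else List.replicate (q.2 - st.2.2).toNat st.2.1),
         st.2.1 + (2 * q.1 - (pos.length : Int)) * (q.2 - st.2.2), q.2))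
      ((PySem.List.pyRange 0 prev 1).map (fsum pos), fsum pos prev, prev)
    = ((PySem.List.pyRange 0 (suf.getLastD prev) 1).map (fsum pos),
        fsum pos (suf.getLastD prev), suf.getLastD prev) := by
  intro suf
  induction suf with
  | nil =>
    intro pre prev _ _ _ _
    simp [PySem.List.enumerate_nil]
  | cons p suf' ih =>
    intro pre prev hsplit hpre hsuf hprev0
    have hsufsorted : List.Pairwise (· < ·) (p :: suf') := by
      refine List.Pairwise.sublist ?_ hsorted
      rw [hsplit]
      exact List.sublist_append_right _ _
    have hpsuf' : ∀ x ∈ suf', p < x := (List.pairwise_cons.mp hsufsorted).1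
    have hprevp : prev ≤ p := hsuf p List.mem_cons_self
    have hsufge : ∀ x ∈ (p :: suf'), p ≤ x := by
      intro x hx
      rcases List.mem_cons.mp hx with rfl | hx'
      · exact le_refl _
      · exact (hpsuf' x hx').le
    rw [PySem.List.enumerate_cons, List.foldl_cons]
    have hstep :
        ((PySem.List.pyRange 0 prev 1).map (fsum pos)
            ++ (if 2 * ((pre.length : Int)) - ((pos.length : Int)) ≠ 0
                then PySem.List.pyRange (fsum pos prev) (fsum pos prev + (2 * ((pre.length : Int)) - (pos.length : Int)) * (p - prev)) (2 * ((pre.length : Int)) - (pos.length : Int))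
                else List.replicate (p - prev).toNat (fsum pos prev)),
          fsum pos prev + (2 * ((pre.length : Int)) - (pos.length : Int)) * (p - prev), p)
        = ((PySem.List.pyRange 0 p 1).map (fsum pos), fsum pos p, p) := by
      have hcur := fsum_endpoint pos pre (p :: suf') hsplit prev p hpre hsufge hprevp
      have hX : (if 2 * ((pre.length : Int)) - ((pos.length : Int)) ≠ 0
                then PySem.List.pyRange (fsum pos prev) (fsum pos prev + (2 * ((pre.length : Int)) - (pos.length : Int)) * (p - prev)) (2 * ((pre.length : Int)) - (pos.length : Int))
                else List.replicate (p - prev).toNat (fsum pos prev))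
          = (PySem.List.pyRange prev p 1).map (fsum pos) := by
        split_ifs with h
        · exact seg_map_range pos pre (p :: suf') hsplit prev p _ rfl h hpre hsufge hprevp
        · exact seg_map_const pos pre (p :: suf') hsplit prev p _ rfl (by omega) hpre hsufge hprevp
      rw [hX, hcur, ← List.map_append, ← PySem.List.pyRange_one_append 0 prev p hprev0 hprevp]
    simp only []
    rw [hstep]
    have hlen : ((pre ++ [p]).length : Int) = (pre.length : Int) + 1 := by
      simp
    have happ : pos = (pre ++ [p]) ++ suf' := by
      rw [hsplit]; simp
    have hpre' : ∀ x ∈ pre ++ [p], x ≤ p := by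
      intro x hx
      rcases List.mem_append.mp hx with hx' | hx'
      · exact le_trans (hpre x hx') hprevp
      · simp at hx'; omega
    have := ih (pre ++ [p]) p happ hpre' (fun x hx => (hpsuf' x hx).le) (le_trans hprev0 hprevp)
    rw [hlen] at this
    rw [this, List.getLastD_cons]

-- facts about the ball-position list
theorem onesL_bounds (cs : List Char) (x : Int) (hx : x ∈ onesL cs) :
    0 ≤ x ∧ x < (cs.length : Int) := by
  unfold onesL at hx
  obtain ⟨q, hq, rfl⟩ := List.mem_map.mp hx
  have hq' := (List.mem_filter.mp hq).1
  obtain ⟨k, hk, rfl⟩ := (PySem.List.mem_enumerate_iff _ _ _).mp hq'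
  simp only []
  omega

theorem onesL_sorted (cs : List Char) : List.Pairwise (· < ·) (onesL cs) := by
  unfold onesL
  rw [List.pairwise_map]
  exact List.Pairwise.filter _ (PySem.List.pairwise_lt_enumerate cs 0)

theorem le_getLastD_of_sorted (l : List Int) (hs : List.Pairwise (· < ·) l) :
    ∀ x ∈ l, ∀ d : Int, x ≤ l.getLastD d := by
  induction l with
  | nil => intro x hx; cases hx
  | cons y t ih =>
    intro x hx d
    rw [List.getLastD_cons]
    rcases List.mem_cons.mp hx with rfl | hxt
    · cases t with
      | nil => simp
      | cons z t' =>
        have hxz : x < z := (List.pairwise_cons.mp hs).1 z List.mem_cons_self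
        have := ih hs.tail z List.mem_cons_self x
        omega
    · exact ih hs.tail x hxt y

theorem getLastD_mem (l : List Int) (d : Int) : l = [] ∨ l.getLastD d ∈ l := by
  induction l generalizing d with
  | nil => exact Or.inl rfl
  | cons y t ih =>
    right
    rw [List.getLastD_cons]
    rcases ih y with rfl | hmem
    · simp
    · exact List.mem_cons_of_mem _ hmem


theorem onesL_mem_iff (cs : List Char) (x : Int) :
    x ∈ onesL cs ↔ ∃ k : Nat, k < cs.length ∧ x = (k : Int) ∧ cs.getD k ' ' = '1' := by
  unfold onesL
  simp only [List.mem_map, List.mem_filter, PySem.List.mem_enumerate_iff]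
  constructor
  · rintro ⟨q, ⟨⟨k, hk, rfl⟩, hq2⟩, rfl⟩
    exact ⟨k, hk, by simp, by rw [List.getD_eq_getElem _ _ hk]; simpa using hq2⟩
  · rintro ⟨k, hk, rfl, hc⟩
    refine ⟨(0 + (k : Int), cs[k]), ⟨⟨k, hk, rfl⟩, ?_⟩, by simp⟩
    rw [List.getD_eq_getElem _ _ hk] at hc
    simp [hc]

theorem prefix_one_iff (cs : List Char) (j : Nat) (hj : j < cs.length) :
    ['1'] <+: cs.drop j ↔ cs.getD j ' ' = '1' := by
  rw [List.drop_eq_getElem_cons hj, List.cons_prefix_iff, List.getD_eq_getElem _ _ hj]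
  constructor
  · rintro ⟨t, ht, -⟩
    exact (List.cons_eq_cons.mp ht).1
  · intro h
    exact ⟨_, by rw [h], List.nil_prefix⟩

theorem infix_one_iff (l : List Char) : ['1'] <:+: l ↔ '1' ∈ l := by
  constructor
  · rintro ⟨s, t, rfl⟩
    simp
  · intro h
    obtain ⟨s, t, rfl⟩ := List.mem_iff_append.mp h
    exact ⟨s, t, by simp⟩

theorem filter_step (l : List Int) (hs : List.Pairwise (· < ·) l) (a r : Int)
    (hr : r ∈ l) (har : a ≤ r) (hmin : ∀ x ∈ l, a ≤ x → r ≤ x) :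
    l.filter (fun x => decide (a ≤ x)) = r :: l.filter (fun x => decide (r + 1 ≤ x)) := by
  induction l with
  | nil => cases hr
  | cons y t ih =>
    have htgt : ∀ x ∈ t, y < x := (List.pairwise_cons.mp hs).1
    by_cases hya : a ≤ y
    · have hry : r ≤ y := hmin y List.mem_cons_self hya
      have hyr : y = r := by
        rcases List.mem_cons.mp hr with rfl | hrt
        · rfl
        · have := htgt r hrt; omega
      subst hyr
      rw [List.filter_cons, List.filter_cons,
        if_pos (show (decide (a ≤ y) = true) by simpa using hya),
        if_neg (show ¬ (decide (y + 1 ≤ y) = true) by simp)]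
      congr 1
      rw [List.filter_eq_self.mpr (fun x hx => by have := htgt x hx; simp; omega),
        List.filter_eq_self.mpr (fun x hx => by have := htgt x hx; simp; omega)]
    · have hyr : y ≠ r := by omega
      rw [List.filter_cons, List.filter_cons,
        if_neg (show ¬ (decide (a ≤ y) = true) by simpa using hya),
        if_neg (show ¬ (decide (r + 1 ≤ y) = true) by simp; omega)]
      exact ih hs.tail (List.mem_cons.mp hr |>.resolve_left (by intro h; exact hyr h.symm))
        (fun x hx h2 => hmin x (List.mem_cons_of_mem _ hx) h2)

theorem scanLoop_eq (boxes : String) :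
    ∀ (fuel k : Nat) (acc : List Int), k ≤ boxes.toList.length →
      boxes.toList.length - k < fuel →
      scanLoop boxes fuel (PySem.Chars.findFrom boxes.toList ['1'] (k : Int)) acc
        = acc ++ (onesL boxes.toList).filter (fun x => decide ((k : Int) ≤ x)) := by
  intro fuel
  induction fuel with
  | zero => intro k acc _ h; omega
  | succ fuel ih =>
    intro k acc hk hfuel
    by_cases hr : PySem.Chars.findFrom boxes.toList ['1'] (k : Int) = -1
    · rw [scanLoop, if_pos hr]
      have hno := (PySem.Chars.findFrom_natCast_eq_neg_one_iff boxes.toList ['1'] k hk).mp hr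
      rw [List.filter_eq_nil_iff.mpr, List.append_nil]
      intro x hx
      obtain ⟨j, hj, rfl, hc⟩ := (onesL_mem_iff _ _).mp hx
      simp only [decide_eq_true_eq, not_le]
      by_contra hcon
      rw [not_lt] at hcon
      apply hno
      rw [infix_one_iff]
      have hkj : k ≤ j := by omega
      apply List.mem_iff_getElem.mpr
      refine ⟨j - k, by rw [List.length_drop]; omega, ?_⟩
      rw [List.getElem_drop]
      rw [List.getD_eq_getElem _ _ hj] at hc
      have : k + (j - k) = j := by omega
      simp [this, hc]
    · obtain ⟨hkr, hpref, hmin⟩ :=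
        PySem.Chars.findFrom_natCast_spec boxes.toList ['1'] k hk hr
      set r := PySem.Chars.findFrom boxes.toList ['1'] (k : Int) with hrdef
      have hr0 : (0 : Int) ≤ r := le_trans (by positivity) hkr
      have hrn : r.toNat < boxes.toList.length := by
        obtain ⟨t, ht, -⟩ := List.cons_prefix_iff.mp hpref
        have hne : boxes.toList.drop r.toNat ≠ [] := by rw [ht]; simp
        by_contra hcon
        exact hne (List.drop_eq_nil_iff.mpr (by omega))
      have hrc : boxes.toList.getD r.toNat ' ' = '1' :=
        (prefix_one_iff boxes.toList r.toNat hrn).mp hpref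
      have hrmem : r ∈ onesL boxes.toList :=
        (onesL_mem_iff _ _).mpr ⟨r.toNat, hrn, (Int.toNat_of_nonneg hr0).symm, hrc⟩
      rw [scanLoop, if_neg hr]
      have hcast : r + 1 = ((r.toNat + 1 : Nat) : Int) := by
        push_cast
        rw [Int.toNat_of_nonneg hr0]
      rw [PySem.Str.findFrom_eq, show ("1" : String).toList = ['1'] from rfl, hcast]
      rw [ih (r.toNat + 1) (acc ++ [r]) (by omega) (by
        have : k ≤ r.toNat := by omega
        omega)]
      rw [List.append_assoc, List.singleton_append]
      congr 1
      symm
      rw [← hcast]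
      apply filter_step _ (onesL_sorted _) _ _ hrmem hkr
      intro x hx hkx
      obtain ⟨j, hj, rfl, hc⟩ := (onesL_mem_iff _ _).mp hx
      by_contra hcon
      rw [not_le] at hcon
      have hjr : j < r.toNat := by omega
      have hjk : k ≤ j := by omega
      exact hmin j hjk hjr ((prefix_one_iff boxes.toList j hj).mpr hc)

theorem scan_eq (boxes : String) :
    scanLoop boxes (boxes.toList.length + 1) (PySem.Str.find boxes "1") []
      = onesL boxes.toList := by
  have h := scanLoop_eq boxes (boxes.toList.length + 1) 0 [] (by omega) (by omega)
  rw [PySem.Str.find_eq, show ("1" : String).toList = ['1'] from rfl,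
    ← PySem.Chars.findFrom_zero boxes.toList ['1'],
    show (0 : Int) = ((0 : Nat) : Int) from rfl, h, List.nil_append]
  apply List.filter_eq_self.mpr
  intro x hx
  have := (onesL_bounds boxes.toList x hx).1
  simp
  omega

theorem A_char (boxes : String) :
    minOperations boxes
      = (PySem.List.pyRange 0 (boxes.toList.length : Int) 1).map (fsum (onesL boxes.toList)) := by
  unfold minOperations
  rw [PySem.List.foldl_append_ite (p := fun q : Int × Char => q.2 = '1')
      (f := fun q : Int × Char => q.1),
    PySem.List.foldl_append_singleton_eq_map]
  simp only [List.nil_append]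
  rw [List.map_congr_left (g := fun p : Int × Char => fsum (onesL boxes.toList) p.1) ?_]
  · rw [show (fun p : Int × Char => fsum (onesL boxes.toList) p.1)
        = (fsum (onesL boxes.toList)) ∘ (fun p : Int × Char => p.1) from rfl,
      ← List.map_map, PySem.List.map_fst_enumerate]
    norm_num
  · intro p _
    rw [show ((PySem.List.enumerate boxes.toList).filter fun x => decide (x.2 = '1')).map
        (fun q => q.1) = onesL boxes.toList from rfl]
    have hcg := PySem.List.foldl_congr_mem (l := onesL boxes.toList) (init := (0 : Int))
      (f := fun count j => if p.1 ≠ j then count + |p.1 - j| else count)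
      (g := fun count j => count + |p.1 - j|)
      (fun acc x _ => by by_cases hix : p.1 = x <;> simp [hix])
    rw [hcg, PySem.List.foldl_add]
    simp [fsum]

-- ===== VERDICT (by name: the statement is the Claim_ definition above) =====
theorem minOperations_spec : Claim_equal_minOperations := by
  intro boxes _
  unfold Spec_minOperations
  simp only [minOperations_alt]
  rw [A_char]
  rw [scan_eq]
  have hsorted := onesL_sorted boxes.toList
  have hnn : ∀ x ∈ onesL boxes.toList, (0 : Int) ≤ x :=
    fun x hx => (onesL_bounds boxes.toList x hx).1
  have hsum0 : (onesL boxes.toList).sum = fsum (onesL boxes.toList) 0 := by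
    have := fsum_eval [] (onesL boxes.toList) 0 (by intro x hx; cases hx) hnn
    simp only [List.nil_append] at this
    rw [this]
    simp
  have hinit := segLoop (onesL boxes.toList) hsorted (onesL boxes.toList) [] 0 (by simp)
    (by intro x hx; cases hx) hnn (le_refl 0)
  simp only [List.length_nil, Nat.cast_zero] at hinit
  rw [hsum0, show ([] : List Int) = (PySem.List.pyRange 0 0 1).map (fsum (onesL boxes.toList))
      from by rw [PySem.List.pyRange_one_eq_nil (le_refl 0)]; rfl, hinit]
  set pos := onesL boxes.toList with hpos
  set P := pos.getLastD 0 with hP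
  by_cases hm : ((pos.length : Int)) = 0
  · have hnil : pos = [] := by
      have : pos.length = 0 := by exact_mod_cast hm
      exact List.length_eq_zero_iff.mp this
    rw [if_neg (by omega)]
    rw [hP, hnil]
    simp only [List.getLastD_nil]
    rw [PySem.List.pyRange_one_eq_nil (le_refl 0)]
    simp only [List.map_nil, List.nil_append, sub_zero]
    rw [PySem.List.pyRange_one]
    rw [List.map_map]
    rw [List.eq_replicate_iff]
    constructor
    · simp
    · intro b hb
      obtain ⟨k, _, rfl⟩ := List.mem_map.mp hb
      simp [Function.comp, fsum]
  · rw [if_pos hm]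
    have hPmem : P ∈ pos := by
      rcases getLastD_mem pos 0 with hnil | hmem
      · exfalso; apply hm; rw [hnil]; simp
      · exact hmem
    have hP0 : 0 ≤ P := (onesL_bounds boxes.toList P (hpos ▸ hPmem)).1
    have hPn : P ≤ (boxes.toList.length : Int) :=
      le_of_lt (onesL_bounds boxes.toList P (hpos ▸ hPmem)).2
    have hple : ∀ x ∈ pos, x ≤ P := fun x hx => le_getLastD_of_sorted pos hsorted x hx 0
    have hsm := seg_map_range pos pos [] (by simp) P (boxes.toList.length : Int)
      ((pos.length : Int)) (by ring) hm hple (by intro x hx; cases hx) hPn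
    rw [hsm, ← List.map_append,
      ← PySem.List.pyRange_one_append 0 P (boxes.toList.length : Int) hP0 hPn]
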